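-- pv_equiv track=rewrite | github.com/IDAES/idaes-pySTAR | pySTAR/construct_tree.py | add_aux_var_for_negative_var
-- ===== SOURCE A (Python) =====
-- def add_aux_var_for_negative_var(expr: str, aux_vars: dict):
--     """
--     If the expression begins with a negative sign, this function
--     defines an auxiliary variable to remove
--
--     Parameters
--     ----------
--     expr : str
--         Expression
--
--     aux_vars : dict
--         Dictionary to store auxiliary variables
--     """
--     if expr[0] != "-":
--         return expr
--
--     counter = len(aux_vars) + 1
--     aux_var_name = f"neg_var_{counter}"
--
--     if any(op in expr[1:] for op in "+*-/"):
--         modified_expression = expr[1:]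
--         op_idxs = [
--             modified_expression.find(op) if modified_expression.find(op) > 0 else 10000
--             for op in "+*-/"
--         ]
--         first_op_idx = min(op_idxs) + 1
--         return aux_var_name + expr[first_op_idx:]
--
--     return aux_var_name
-- ===== SOURCE B (Python) =====
-- def add_aux_var_for_negative_var(expr: str, aux_vars: dict):
--     """Single left-to-right scan instead of four find() passes plus a min-reduction."""
--     if expr[0] != "-":
--         return expr
--     aux_var_name = f"neg_var_{len(aux_vars) + 1}"
--     for i in range(2, len(expr)):
--         if expr[i] in "+*-/":
--             return aux_var_name + expr[i:]
--     return aux_var_name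
-- ===== Notes on version B (the rewrite author's own statement) =====
-- stated objective: simpler
-- what changed: Replaces the any()-guard, the four per-operator find() scans with a 10000 sentinel and the min-reduction by one left-to-right scan from index 2 that returns at the first operator found.
-- intended difference: On expressions '-c…' where c is itself an operator that recurs before any other operator's first occurrence, or where the first operator at index ≥ 2 lies at or beyond A's 10000 find-sentinel while some operator is absent (or trapped at index 1), A's stale-find/sentinel min picks the wrong cut and returns a wrongly truncated string (A('--x-y',{}) = 'neg_var_1'), while B returns the aux name plus the suffix from the first operator at index ≥ 2 ('neg_var_1-y'), the intended rewrite. — e.g. on add_aux_var_for_negative_var("--x-y", []): A returns "neg_var_1", B returns "neg_var_1-y"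
import Mathlib
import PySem

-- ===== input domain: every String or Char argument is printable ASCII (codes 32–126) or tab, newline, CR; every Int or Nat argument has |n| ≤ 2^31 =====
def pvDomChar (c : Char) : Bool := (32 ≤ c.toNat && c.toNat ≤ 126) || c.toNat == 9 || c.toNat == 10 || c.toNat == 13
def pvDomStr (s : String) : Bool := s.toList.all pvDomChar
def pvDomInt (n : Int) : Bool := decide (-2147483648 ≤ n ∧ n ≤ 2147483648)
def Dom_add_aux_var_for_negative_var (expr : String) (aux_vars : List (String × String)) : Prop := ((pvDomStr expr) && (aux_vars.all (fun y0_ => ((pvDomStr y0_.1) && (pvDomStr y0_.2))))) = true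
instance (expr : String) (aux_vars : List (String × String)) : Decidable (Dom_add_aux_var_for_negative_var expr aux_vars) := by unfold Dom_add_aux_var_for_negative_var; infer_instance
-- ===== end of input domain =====

-- B replaces A's any()-guard, four per-operator find() scans with a 10000 sentinel and min-reduction
-- by one left-to-right scan from index 2 (objective: simpler).

-- the operator characters "+*-/" (shared spec constant)
def pvOps : List Char := ['+', '*', '-', '/']

-- ===== PORT A =====
def add_aux_var_for_negative_var (expr : String) (aux_vars : List (String × String)) : String :=
  match PySem.Str.pyGet? expr 0 with
  | none => ""      -- expr[0] on "" raises IndexError; excluded by Pre_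
  | some c0 =>
    if c0 ≠ '-' then expr
    else
      let counter : Int := (aux_vars.length : Int) + 1
      let aux_var_name : List Char := "neg_var_".toList ++ PySem.Int.toChars counter
      let modified : List Char := PySem.List.slice expr.toList (some 1) none
      if pvOps.any (fun op => PySem.Chars.isIn [op] modified) then
        let op_idxs : List Int := pvOps.map (fun op =>
          if PySem.Chars.find modified [op] > 0 then PySem.Chars.find modified [op] else 10000)
        let first_op_idx : Int := (PySem.List.min? op_idxs (fun x => x)).getD 0 + 1
        String.ofList (aux_var_name ++ PySem.List.slice expr.toList (some first_op_idx) none)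
      else
        String.ofList aux_var_name

-- ===== PORT B =====
-- the for-loop over i in range(2, len(expr)): scan the remaining characters, keeping the suffix
def pvScan (name : List Char) : List Char → List Char
  | [] => name
  | c :: rest => if pvOps.contains c then name ++ (c :: rest) else pvScan name rest

def add_aux_var_for_negative_var_alt (expr : String) (aux_vars : List (String × String)) : String :=
  match PySem.Str.pyGet? expr 0 with
  | none => ""      -- expr[0] on "" raises IndexError; excluded by Pre_
  | some c0 =>
    if c0 ≠ '-' then expr
    else
      let aux_var_name : List Char := "neg_var_".toList ++ PySem.Int.toChars ((aux_vars.length : Int) + 1)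
      String.ofList (pvScan aux_var_name (expr.toList.drop 2))

-- ===== PRECONDITION & SPEC =====
-- Pre_ excludes only the empty string, on which A (and B) raise IndexError at expr[0].
def Pre_add_aux_var_for_negative_var (expr : String) (aux_vars : List (String × String)) : Prop := expr ≠ ""
instance (expr : String) (aux_vars : List (String × String)) : Decidable (Pre_add_aux_var_for_negative_var expr aux_vars) := by unfold Pre_add_aux_var_for_negative_var; infer_instance
def pvWitness_add_aux_var_for_negative_var : String × (List (String × String)) := ("-x+y", [("a", "b")])

-- On expressions '-c…' where c is itself an operator that recurs before any other operator's first
-- occurrence, or where the first operator at index ≥ 2 lies at or beyond A's 10000 find-sentinel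
-- while some operator is absent (or trapped at index 1), A's stale-find/sentinel min picks the wrong
-- cut and returns a wrongly truncated string (A "--x-y" {} = "neg_var_1"); B returns the aux name
-- plus the suffix from the first operator at index ≥ 2 ("neg_var_1-y"), the intended rewrite.
def D_add_aux_var_for_negative_var (expr : String) (aux_vars : List (String × String)) : Prop :=
  (match expr.toList with
   | '-' :: c :: rest =>
     let k := rest.findIdx pvOps.contains
     if rest.getD k '\x00' == c then k != 9999
     else Nat.ble 10000 k && (pvOps.contains c || rest.any pvOps.contains != pvOps.all rest.contains)
   | _ => false) = true
instance (expr : String) (aux_vars : List (String × String)) : Decidable (D_add_aux_var_for_negative_var expr aux_vars) := by unfold D_add_aux_var_for_negative_var; infer_instance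

def Spec_add_aux_var_for_negative_var (expr : String) (aux_vars : List (String × String)) (out : String) : Prop := ¬ D_add_aux_var_for_negative_var expr aux_vars → out = add_aux_var_for_negative_var_alt expr aux_vars
instance (expr : String) (aux_vars : List (String × String)) (out : String) : Decidable (Spec_add_aux_var_for_negative_var expr aux_vars out) := by unfold Spec_add_aux_var_for_negative_var; infer_instance

def pvDiffWitness_add_aux_var_for_negative_var : String × (List (String × String)) := ("--x-y", [])
def pvDiffWitnessOut_add_aux_var_for_negative_var : String × String := ("neg_var_1", "neg_var_1-y")

-- ===== CLAIM (what is proved, stated in full; the proofs are below) =====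
def Claim_unchanged_add_aux_var_for_negative_var : Prop := ∀ (expr : String) (aux_vars : List (String × String)), Dom_add_aux_var_for_negative_var expr aux_vars → Pre_add_aux_var_for_negative_var expr aux_vars → Spec_add_aux_var_for_negative_var expr aux_vars (add_aux_var_for_negative_var expr aux_vars)
def Claim_changed_add_aux_var_for_negative_var : Prop := Dom_add_aux_var_for_negative_var (pvDiffWitness_add_aux_var_for_negative_var.1) (pvDiffWitness_add_aux_var_for_negative_var.2) ∧ Pre_add_aux_var_for_negative_var (pvDiffWitness_add_aux_var_for_negative_var.1) (pvDiffWitness_add_aux_var_for_negative_var.2) ∧ D_add_aux_var_for_negative_var (pvDiffWitness_add_aux_var_for_negative_var.1) (pvDiffWitness_add_aux_var_for_negative_var.2) ∧ add_aux_var_for_negative_var (pvDiffWitness_add_aux_var_for_negative_var.1) (pvDiffWitness_add_aux_var_for_negative_var.2) = pvDiffWitnessOut_add_aux_var_for_negative_var.1 ∧ add_aux_var_for_negative_var_alt (pvDiffWitness_add_aux_var_for_negative_var.1) (pvDiffWitness_add_aux_var_for_negative_var.2) = pvDiffWitnessOut_add_aux_var_for_negative_var.2 ∧ pvDiffWitnessOut_add_aux_var_for_negative_var.1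 ≠ pvDiffWitnessOut_add_aux_var_for_negative_var.2
def Claim_exact_add_aux_var_for_negative_var : Prop := ∀ (expr : String) (aux_vars : List (String × String)), Dom_add_aux_var_for_negative_var expr aux_vars → Pre_add_aux_var_for_negative_var expr aux_vars → D_add_aux_var_for_negative_var expr aux_vars → add_aux_var_for_negative_var expr aux_vars ≠ add_aux_var_for_negative_var_alt expr aux_vars

-- ===== LEMMAS AND PROOFS =====

-- proof-side helper: first operator of the list together with its index
def pvFirstOp : List Char → Nat → Option (Nat × Char)
  | [], _ => none
  | c :: rest, i => if pvOps.contains c then some (i, c) else pvFirstOp rest (i + 1)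

-- proof-side restatement of D_'s condition on a '-'-led character list
def pvDiffB : List Char → Bool
  | '-' :: c :: rest =>
    (match pvFirstOp rest 0 with
     | some (k, d) =>
       if d = c then decide (k ≠ 9999)
       else decide (10000 ≤ k) && (pvOps.contains c || !pvOps.all (rest.contains ·))
     | none => pvOps.contains c && decide (10000 ≤ rest.length))
  | _ => false

theorem pvSingletonPrefix (a : Char) (t : List Char) : [a] <+: t ↔ t.head? = some a := by
  cases t <;> simp [eq_comm]

theorem pvFirstOp_shift (t : List Char) (i : Nat) :
    pvFirstOp t (i + 1) = Option.map (fun p => (p.1 + 1, p.2)) (pvFirstOp t i) := by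
  induction t generalizing i with
  | nil => rfl
  | cons c rest ih =>
    by_cases h : c ∈ pvOps <;> simp [pvFirstOp, List.contains_eq_mem, h, ih]

theorem pvScan_none (name rest : List Char) (h : pvFirstOp rest 0 = none) :
    pvScan name rest = name := by
  induction rest with
  | nil => rfl
  | cons c t ih =>
    by_cases hc : c ∈ pvOps
    · simp [pvFirstOp, List.contains_eq_mem, hc] at h
    · simp [pvFirstOp, List.contains_eq_mem, hc, pvFirstOp_shift] at h
      simp [pvScan, List.contains_eq_mem, hc, ih h]

theorem pvScan_some (name rest : List Char) (k : Nat) (d : Char)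
    (h : pvFirstOp rest 0 = some (k, d)) :
    pvScan name rest = name ++ rest.drop k := by
  induction rest generalizing k with
  | nil => simp [pvFirstOp] at h
  | cons c t ih =>
    by_cases hc : c ∈ pvOps
    · simp [pvFirstOp, List.contains_eq_mem, hc] at h
      obtain ⟨hk, hd⟩ := h
      subst hd
      simp [pvScan, List.contains_eq_mem, hc, ← hk]
    · simp [pvFirstOp, List.contains_eq_mem, hc, pvFirstOp_shift] at h
      obtain ⟨k', h0, hk⟩ := h
      simp [pvScan, List.contains_eq_mem, hc, ih k' h0, ← hk]

theorem pvFirstOp_none_forall (rest : List Char) (h : pvFirstOp rest 0 = none) :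
    ∀ x ∈ rest, x ∉ pvOps := by
  induction rest with
  | nil => simp
  | cons c t ih =>
    by_cases hc : c ∈ pvOps
    · simp [pvFirstOp, List.contains_eq_mem, hc] at h
    · simp [pvFirstOp, List.contains_eq_mem, hc, pvFirstOp_shift] at h
      intro x hx
      rcases List.mem_cons.mp hx with h1 | h1
      · exact h1 ▸ hc
      · exact ih h x h1

theorem pvFirstOp_decomp (rest : List Char) (k : Nat) (d : Char)
    (h : pvFirstOp rest 0 = some (k, d)) :
    ∃ pre suf, rest = pre ++ d :: suf ∧ pre.length = k ∧
      (∀ x ∈ pre, x ∉ pvOps) ∧ d ∈ pvOps := by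
  induction rest generalizing k with
  | nil => simp [pvFirstOp] at h
  | cons c t ih =>
    by_cases hc : c ∈ pvOps
    · simp [pvFirstOp, List.contains_eq_mem, hc] at h
      obtain ⟨hk, hd⟩ := h
      exact ⟨[], t, by simp [hd], by simp [← hk], by simp, hd ▸ hc⟩
    · simp [pvFirstOp, List.contains_eq_mem, hc, pvFirstOp_shift] at h
      obtain ⟨k', h0, hk⟩ := h
      obtain ⟨pre, suf, hrest, hlen, hpre, hop⟩ := ih k' h0
      refine ⟨c :: pre, suf, by simp [hrest], by simp [hlen]; omega, ?_, hop⟩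
      intro x hx
      rcases List.mem_cons.mp hx with h1 | h1
      · exact h1 ▸ hc
      · exact hpre x h1

theorem pvFi_none (rest : List Char) (h : pvFirstOp rest 0 = none) :
    rest.findIdx (pvOps.contains ·) = rest.length := by
  induction rest with
  | nil => rfl
  | cons c t ih =>
    by_cases hc : c ∈ pvOps
    · simp [pvFirstOp, List.contains_eq_mem, hc] at h
    · simp [pvFirstOp, List.contains_eq_mem, hc, pvFirstOp_shift] at h
      simp [List.findIdx_cons, List.contains_eq_mem, hc]
      exact pvFirstOp_none_forall t h

theorem pvFi_some (rest : List Char) (k : Nat) (d : Char) (h : pvFirstOp rest 0 = some (k, d)) :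
    rest.findIdx (pvOps.contains ·) = k ∧ k < rest.length ∧ rest.getD k '\x00' = d := by
  induction rest generalizing k with
  | nil => simp [pvFirstOp] at h
  | cons c t ih =>
    by_cases hc : c ∈ pvOps
    · simp [pvFirstOp, List.contains_eq_mem, hc] at h
      obtain ⟨hk, hd⟩ := h
      subst hd
      exact ⟨by simp [List.findIdx_cons, List.contains_eq_mem, hc, ← hk], by simp [← hk], by simp [← hk]⟩
    · simp [pvFirstOp, List.contains_eq_mem, hc, pvFirstOp_shift] at h
      obtain ⟨k', h0, hk⟩ := h
      obtain ⟨h1, h2, h3⟩ := ih k' h0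
      have h1' : List.findIdx (fun x => decide (x ∈ pvOps)) t = k' := by
        simpa [List.contains_eq_mem] using h1
      refine ⟨by simp [List.findIdx_cons, List.contains_eq_mem, hc, h1', ← hk], by simp; omega, ?_⟩
      rw [← hk, List.getD_cons_succ]
      exact h3

-- find of a single-character substring: the first occurrence
theorem pvFind_first (pre suf : List Char) (op : Char) (hpre : ∀ x ∈ pre, x ≠ op) :
    PySem.Chars.find (pre ++ op :: suf) [op] = (pre.length : Int) := by
  have hmem : op ∈ pre ++ op :: suf := by simp
  have hinf : [op] <:+: pre ++ op :: suf := (List.singleton_infix_iff op _).mpr hmem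
  have h0 : 0 ≤ PySem.Chars.find (pre ++ op :: suf) [op] := (PySem.Chars.find_nonneg_iff _ _).mpr hinf
  obtain ⟨hat, hmin⟩ := PySem.Chars.find_spec (s := pre ++ op :: suf) (sub := [op]) h0
  rw [pvSingletonPrefix, List.head?_drop] at hat
  have hne : (PySem.Chars.find (pre ++ op :: suf) [op]).toNat = pre.length := by
    set j := (PySem.Chars.find (pre ++ op :: suf) [op]).toNat with hj
    rcases lt_trichotomy j pre.length with hlt | heq | hgt
    · exfalso
      rw [List.getElem?_append_left hlt] at hat
      rw [List.getElem?_eq_getElem hlt] at hat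
      exact hpre _ (pre.getElem_mem hlt) (by simpa using hat)
    · exact heq
    · exfalso
      apply hmin pre.length hgt
      rw [pvSingletonPrefix, List.head?_drop]
      simp
  omega

theorem pvFind_lb (pre t : List Char) (op : Char) (hpre : ∀ x ∈ pre, x ≠ op) :
    PySem.Chars.find (pre ++ t) [op] = -1 ∨ (pre.length : Int) ≤ PySem.Chars.find (pre ++ t) [op] := by
  by_cases hinf : [op] <:+: pre ++ t
  · right
    have h0 : 0 ≤ PySem.Chars.find (pre ++ t) [op] := (PySem.Chars.find_nonneg_iff _ _).mpr hinf
    obtain ⟨hat, hmin⟩ := PySem.Chars.find_spec (s := pre ++ t) (sub := [op]) h0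
    by_contra hlt
    rw [not_le] at hlt
    have hj : (PySem.Chars.find (pre ++ t) [op]).toNat < pre.length := by omega
    rw [pvSingletonPrefix, List.head?_drop] at hat
    rw [List.getElem?_append_left hj] at hat
    rw [List.getElem?_eq_getElem hj] at hat
    exact hpre _ (pre.getElem_mem hj) (by simpa using hat)
  · left
    exact (PySem.Chars.find_eq_neg_one_iff _ _).mpr hinf

theorem pvFind_not_mem (m : List Char) (op : Char) (h : op ∉ m) :
    PySem.Chars.find m [op] = -1 := by
  exact (PySem.Chars.find_eq_neg_one_iff _ _).mpr (fun hc => h ((List.singleton_infix_iff op m).mp hc))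

theorem pvMin4 (a b c d v : Int) (h1 : v ≤ a) (h2 : v ≤ b) (h3 : v ≤ c) (h4 : v ≤ d)
    (he : a = v ∨ b = v ∨ c = v ∨ d = v) : List.foldl min a [b, c, d] = v := by
  simp only [List.foldl]
  omega

theorem pvMin4ne (a b c d v : Int)
    (h1 : 1 ≤ a ∧ a ≠ v) (h2 : 1 ≤ b ∧ b ≠ v) (h3 : 1 ≤ c ∧ c ≠ v) (h4 : 1 ≤ d ∧ d ≠ v) :
    1 ≤ List.foldl min a [b, c, d] ∧ List.foldl min a [b, c, d] ≠ v := by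
  simp only [List.foldl]
  omega

theorem pvMin4le (a b c d : Int)
    (h1 : 1 ≤ a) (h2 : 1 ≤ b) (h3 : 1 ≤ c) (h4 : 1 ≤ d)
    (he : a = 10000 ∨ b = 10000 ∨ c = 10000 ∨ d = 10000) :
    1 ≤ List.foldl min a [b, c, d] ∧ List.foldl min a [b, c, d] ≤ 10000 := by
  simp only [List.foldl]
  omega



theorem pvDiffB_bridge (expr : String) (aux : List (String × String)) (m : List Char)
    (hl : expr.toList = '-' :: m)
    (hnd : ¬ D_add_aux_var_for_negative_var expr aux) : pvDiffB ('-' :: m) = false := by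
  unfold D_add_aux_var_for_negative_var at hnd
  rw [hl, Bool.not_eq_true] at hnd
  cases m with
  | nil => rfl
  | cons c rest =>
    rcases hfo : pvFirstOp rest 0 with _ | ⟨k, d⟩
    · have hfi := pvFi_none rest hfo
      have hgd : rest.getD rest.length '\x00' = '\x00' := List.getD_eq_default _ _ (le_refl _)
      simp only [hfi, hgd] at hnd
      simp [pvDiffB, hfo]
      intro hc
      have hne : ('\x00' == c) = false := by
        have : c ≠ '\x00' := by rintro rfl; simp [pvOps] at hc
        simpa [beq_eq_false_iff_ne] using fun he => this he.symm
      rw [hne] at hnd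
      simp [List.contains_eq_mem, hc] at hnd
      revert hnd
      cases hb : Nat.ble 10000 rest.length
      · intro _
        have hble : ¬ (10000 ≤ rest.length) := by
          rw [← Nat.ble_eq, hb]
          simp
        omega
      · intro hnd
        simp at hnd
    · obtain ⟨hfi, hlt, hgd⟩ := pvFi_some rest k d hfo
      simp only [hfi, hgd] at hnd
      simp [pvDiffB, hfo]
      by_cases hdc : d = c
      · simp [hdc] at hnd ⊢
        exact hnd
      · obtain ⟨pre, suf, hrest, hlen2, hpre, hdop⟩ := pvFirstOp_decomp rest k d hfo
        have hne : (d == c) = false := by simpa [beq_eq_false_iff_ne] using hdc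
        rw [hne] at hnd
        simp [hdc, Nat.ble_eq] at hnd ⊢
        intro h10
        obtain ⟨h1, h2⟩ := hnd h10
        refine ⟨h1, ?_⟩
        have hany : rest.any pvOps.contains = true :=
          List.any_eq_true.mpr ⟨d, by simp [hrest], by simp [List.contains_eq_mem, hdop]⟩
        rw [hany] at h2
        have h3 := h2.symm
        simp [List.contains_eq_mem] at h3
        exact h3

theorem pvCore (m name : List Char) (hnd : pvDiffB ('-' :: m) = false) :
    (if (pvOps.any fun op => PySem.Chars.isIn [op] m) = true then
       name ++ PySem.List.slice ('-' :: m)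
         (some ((PySem.List.min?
             (List.map (fun op => if PySem.Chars.find m [op] > 0 then PySem.Chars.find m [op] else 10000) pvOps)
             fun x => x).getD 0 + 1)) none
     else name) = pvScan name m.tail := by
  cases m with
  | nil =>
    have hG : (pvOps.any fun op => PySem.Chars.isIn [op] ([] : List Char)) = false := by decide
    simp [hG, pvScan]
  | cons c rest =>
    simp only [List.tail_cons]
    rcases hfo : pvFirstOp rest 0 with _ | ⟨k, d⟩
    · have hforall := pvFirstOp_none_forall rest hfo
      by_cases hcop : c ∈ pvOps
      · have hnd2 : rest.length < 10000 := by
          simp [pvDiffB, hfo, List.contains_eq_mem, hcop] at hnd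
          omega
        have hfind_c : PySem.Chars.find (c :: rest) [c] = (0 : Int) := by
          simpa using pvFind_first [] rest c (by simp)
        have hmap : ∀ op ∈ pvOps,
            (if PySem.Chars.find (c :: rest) [op] > 0 then PySem.Chars.find (c :: rest) [op] else 10000)
              = (fun _ => (10000 : Int)) op := by
          intro op hop
          by_cases hne : op = c
          · subst hne; rw [hfind_c]; norm_num
          · have hfo2 : PySem.Chars.find (c :: rest) [op] = -1 := by
              apply pvFind_not_mem
              intro hmem
              rcases List.mem_cons.mp hmem with h1 | h1
              · exact hne h1
              · exact hforall op h1 hop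
            rw [hfo2]; norm_num
        have hG : (pvOps.any fun op => PySem.Chars.isIn [op] (c :: rest)) = true :=
          List.any_eq_true.mpr ⟨c, hcop,
            (PySem.Chars.isIn_iff_infix _ _).mpr ((List.singleton_infix_iff c _).mpr (List.mem_cons_self))⟩
        rw [if_pos hG, List.map_congr_left hmap, pvScan_none name rest hfo]
        have hmin : (PySem.List.min? (List.map (fun _ => (10000 : Int)) pvOps) fun x => x).getD 0 = (10000 : Int) := by
          simp only [pvOps, List.map_cons, List.map_nil, PySem.List.min?_id_cons, Option.getD_some]
          norm_num
        rw [hmin, PySem.List.slice_from _ (by norm_num)]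
        have h1 : ((10000 : Int) + 1).toNat = 10001 := rfl
        rw [h1, List.drop_eq_nil_of_le (by simp; omega), List.append_nil]
      · have hG : (pvOps.any fun op => PySem.Chars.isIn [op] (c :: rest)) = false := by
          apply List.any_eq_false.mpr
          intro op hop
          simp only [Bool.not_eq_true]
          apply (PySem.Chars.isIn_eq_false_iff _ _).mpr
          intro hinf
          rcases List.mem_cons.mp ((List.singleton_infix_iff op _).mp hinf) with h1 | h1
          · exact hcop (h1 ▸ hop)
          · exact hforall op h1 hop
        rw [if_neg (by simp [hG]), pvScan_none name rest hfo]
    · obtain ⟨pre, suf, hrest, hlen, hpre, hdop⟩ := pvFirstOp_decomp rest k d hfo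
      have hm : c :: rest = (c :: pre) ++ (d :: suf) := by simp [hrest]
      have hcases : (d = c ∧ k = 9999) ∨ (d ≠ c ∧ k < 10000) ∨
          (d ≠ c ∧ c ∉ pvOps ∧ ∀ op ∈ pvOps, op ∈ rest) := by
        by_cases hdc : d = c
        · left
          refine ⟨hdc, ?_⟩
          simp [pvDiffB, hfo, hdc] at hnd
          exact hnd
        · simp [pvDiffB, hfo, hdc, List.contains_eq_mem] at hnd
          by_cases hk10 : k < 10000
          · exact Or.inr (Or.inl ⟨hdc, hk10⟩)
          · exact Or.inr (Or.inr ⟨hdc, (hnd (by omega)).1, (hnd (by omega)).2⟩)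
      have hk : k ≤ 9999 ∨ (c ∉ pvOps ∧ ∀ op ∈ pvOps, op ∈ rest) := by
        rcases hcases with ⟨_, h⟩ | ⟨_, h⟩ | ⟨_, h1, h2⟩
        · exact Or.inl (by omega)
        · exact Or.inl (by omega)
        · exact Or.inr ⟨h1, h2⟩
      have hdm : d ∈ c :: rest := by simp [hrest]
      have hG : (pvOps.any fun op => PySem.Chars.isIn [op] (c :: rest)) = true :=
        List.any_eq_true.mpr ⟨d, hdop,
          (PySem.Chars.isIn_iff_infix _ _).mpr ((List.singleton_infix_iff d _).mpr hdm)⟩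
      have hA : ∀ op ∈ pvOps,
          ((k : Int) + 1) ≤ (if PySem.Chars.find (c :: rest) [op] > 0 then PySem.Chars.find (c :: rest) [op] else 10000) := by
        intro op hop
        by_cases hoc : op = c
        · rcases hk with hk' | ⟨hcop, _⟩
          · subst hoc
            have h0 : PySem.Chars.find (op :: rest) [op] = (0 : Int) := by
              simpa using pvFind_first [] rest op (by simp)
            rw [h0]
            norm_num
            omega
          · exact absurd hop (hoc ▸ hcop)
        · have hpre' : ∀ x ∈ (c :: pre), x ≠ op := by
            intro x hx
            rcases List.mem_cons.mp hx with h1 | h1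
            · exact h1 ▸ (fun he => hoc he.symm)
            · exact fun he => (hpre x h1) (he ▸ hop)
          rw [hm]
          rcases pvFind_lb (c :: pre) (d :: suf) op hpre' with hf | hf
          · rcases hk with hk' | ⟨_, hall⟩
            · rw [hf]; norm_num; omega
            · exfalso
              have hmem : op ∈ (c :: pre) ++ (d :: suf) := by
                rw [← hm]
                exact List.mem_cons_of_mem c (hall op hop)
              have h0 : (0 : Int) ≤ PySem.Chars.find ((c :: pre) ++ (d :: suf)) [op] :=
                (PySem.Chars.find_nonneg_iff _ _).mpr ((List.singleton_infix_iff op _).mpr hmem)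
              omega
          · have hf' : (k : Int) + 1 ≤ PySem.Chars.find ((c :: pre) ++ (d :: suf)) [op] := by
              have : ((c :: pre).length : Int) = (k : Int) + 1 := by simp [hlen]
              omega
            rw [if_pos (by omega)]
            exact hf'
      have hB : (if PySem.Chars.find (c :: rest) [d] > 0 then PySem.Chars.find (c :: rest) [d] else 10000)
          = (k : Int) + 1 := by
        by_cases hdc : d = c
        · have hk9 : k = 9999 := by
            rcases hcases with ⟨_, h⟩ | ⟨h, _⟩ | ⟨h, _, _⟩
            · exact h
            · exact absurd hdc h
            · exact absurd hdc h
          subst hdc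
          have h0 : PySem.Chars.find (d :: rest) [d] = (0 : Int) := by
            simpa using pvFind_first [] rest d (by simp)
          rw [h0, hk9]
          norm_num
        · have hfd : PySem.Chars.find (c :: rest) [d] = (k : Int) + 1 := by
            rw [hm]
            have hpre' : ∀ x ∈ (c :: pre), x ≠ d := by
              intro x hx
              rcases List.mem_cons.mp hx with h1 | h1
              · exact h1 ▸ (fun he => hdc he.symm)
              · exact fun he => (hpre x h1) (he ▸ hdop)
            have := pvFind_first (c :: pre) suf d hpre'
            rw [this]
            simp [hlen]
          rw [hfd, if_pos (by omega)]
      have hmin : (PySem.List.min?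
          (List.map (fun op => if PySem.Chars.find (c :: rest) [op] > 0 then PySem.Chars.find (c :: rest) [op] else 10000) pvOps)
          fun x => x).getD 0 = (k : Int) + 1 := by
        have hd4 : d = '+' ∨ d = '*' ∨ d = '-' ∨ d = '/' := by simpa [pvOps] using hdop
        have h1 := hA '+' (by decide)
        have h2 := hA '*' (by decide)
        have h3 := hA '-' (by decide)
        have h4 := hA '/' (by decide)
        have he : (if PySem.Chars.find (c :: rest) ['+'] > 0 then PySem.Chars.find (c :: rest) ['+'] else 10000) = (k : Int) + 1
            ∨ (if PySem.Chars.find (c :: rest) ['*'] > 0 then PySem.Chars.find (c :: rest) ['*'] else 10000) = (k : Int) + 1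
            ∨ (if PySem.Chars.find (c :: rest) ['-'] > 0 then PySem.Chars.find (c :: rest) ['-'] else 10000) = (k : Int) + 1
            ∨ (if PySem.Chars.find (c :: rest) ['/'] > 0 then PySem.Chars.find (c :: rest) ['/'] else 10000) = (k : Int) + 1 := by
          rcases hd4 with rfl | rfl | rfl | rfl
          · exact Or.inl hB
          · exact Or.inr (Or.inl hB)
          · exact Or.inr (Or.inr (Or.inl hB))
          · exact Or.inr (Or.inr (Or.inr hB))
        simp only [pvOps, List.map_cons, List.map_nil, PySem.List.min?_id_cons, Option.getD_some]
        exact pvMin4 _ _ _ _ _ h1 h2 h3 h4 he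
      rw [if_pos hG, hmin, pvScan_some name rest k d hfo,
        PySem.List.slice_from _ (by omega)]
      have h2 : ((k : Int) + 1 + 1).toNat = k + 1 + 1 := by omega
      rw [h2, List.drop_succ_cons, List.drop_succ_cons]


-- ===== VERDICT (by name: the statement is the Claim_ definition above) =====
theorem add_aux_var_for_negative_var_spec : Claim_unchanged_add_aux_var_for_negative_var := by
  intro expr aux hdom hpre
  unfold Spec_add_aux_var_for_negative_var
  intro hnd
  rcases hl : expr.toList with _ | ⟨c0, m⟩
  · exact absurd (by cases expr; simp_all) hpre
  · have hg : PySem.Str.pyGet? expr 0 = some c0 := by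
      simp [pysem, hl]
    unfold add_aux_var_for_negative_var add_aux_var_for_negative_var_alt
    rw [hg]
    by_cases hc0 : c0 = '-'
    · subst hc0
      have hnd' := pvDiffB_bridge expr aux m hl hnd
      simp only [hl, PySem.List.slice_from_one, List.tail_cons, List.drop_succ_cons,
        List.drop_one]
      rw [if_neg (show ¬('-' ≠ '-') from by simp)]
      rw [if_neg (show ¬('-' ≠ '-') from by simp)]
      rw [← pvCore m ("neg_var_".toList ++ PySem.Int.toChars ((aux.length : Int) + 1)) hnd',
        apply_ite String.ofList]
    · simp [hc0]

theorem add_aux_var_for_negative_var_changed : Claim_changed_add_aux_var_for_negative_var := by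
  unfold Claim_changed_add_aux_var_for_negative_var; decide

theorem add_aux_var_for_negative_var_tight : Claim_exact_add_aux_var_for_negative_var := by
  intro expr aux hdom hpre hd
  unfold D_add_aux_var_for_negative_var at hd
  rcases hl : expr.toList with _ | ⟨c0, m⟩
  · rw [hl] at hd
    simp at hd
  · rw [hl] at hd
    by_cases hc0 : c0 = '-'
    swap
    · exfalso
      split at hd <;> simp_all
    subst hc0
    rcases m with _ | ⟨c, rest⟩
    · simp at hd
    have hg : PySem.Str.pyGet? expr 0 = some '-' := by simp [pysem, hl]
    unfold add_aux_var_for_negative_var add_aux_var_for_negative_var_alt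
    rw [hg]
    simp only [hl, PySem.List.slice_from_one, List.tail_cons, List.drop_succ_cons, List.drop_zero]
    rw [if_neg (show ¬('-' ≠ '-') from by simp)]
    rw [if_neg (show ¬('-' ≠ '-') from by simp)]
    rcases hfo : pvFirstOp rest 0 with _ | ⟨k, d⟩
    · -- no operator after index 1: A appends the tail beyond the 10000 sentinel, B returns the bare name
      have hforall := pvFirstOp_none_forall rest hfo
      have hfi := pvFi_none rest hfo
      have hgd : rest.getD rest.length '\x00' = '\x00' := List.getD_eq_default _ _ (le_refl _)
      have hcnz : c ≠ '\x00' := by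
        have h1 := Bool.and_elim_left hdom
        unfold pvDomStr at h1
        rw [hl] at h1
        simp [List.all_cons] at h1
        intro he
        rw [he] at h1
        exact absurd h1.2.1 (by decide)
      have hne : ('\x00' == c) = false := by
        simpa [beq_eq_false_iff_ne] using fun he => hcnz he.symm
      simp only [hfi, hgd] at hd
      rw [if_neg (by simp [hne])] at hd
      simp [List.contains_eq_mem, Nat.ble_eq] at hd
      obtain ⟨h10, hor⟩ := hd
      have hcop : c ∈ pvOps := by
        rcases hor with h | h
        · exact h
        · exfalso
          apply h
          have hany : rest.any pvOps.contains = false :=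
            List.any_eq_false.mpr (fun x hx => by
              simp [List.contains_eq_mem]
              exact hforall x hx)
          have hall : pvOps.all rest.contains = false := by
            cases hx : pvOps.all rest.contains
            · rfl
            · exfalso
              have h4 := List.all_eq_true.mp hx '+' (by decide)
              simp [List.contains_eq_mem] at h4
              exact hforall '+' h4 (by decide)
          rw [hany, hall]
      have hfind_c : PySem.Chars.find (c :: rest) [c] = (0 : Int) := by
        simpa using pvFind_first [] rest c (by simp)
      have hmap : ∀ op ∈ pvOps,
          (if PySem.Chars.find (c :: rest) [op] > 0 then PySem.Chars.find (c :: rest) [op] else 10000)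
            = (fun _ => (10000 : Int)) op := by
        intro op hop
        by_cases hne2 : op = c
        · subst hne2; rw [hfind_c]; norm_num
        · have hfo2 : PySem.Chars.find (c :: rest) [op] = -1 := by
            apply pvFind_not_mem
            intro hmem
            rcases List.mem_cons.mp hmem with h1 | h1
            · exact hne2 h1
            · exact hforall op h1 hop
          rw [hfo2]; norm_num
      have hG : (pvOps.any fun op => PySem.Chars.isIn [op] (c :: rest)) = true :=
        List.any_eq_true.mpr ⟨c, hcop,
          (PySem.Chars.isIn_iff_infix _ _).mpr ((List.singleton_infix_iff c _).mpr (List.mem_cons_self))⟩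
      rw [if_pos hG, List.map_congr_left hmap, pvScan_none _ rest hfo]
      have hmin : (PySem.List.min? (List.map (fun _ => (10000 : Int)) pvOps) fun x => x).getD 0 = (10000 : Int) := by
        simp only [pvOps, List.map_cons, List.map_nil, PySem.List.min?_id_cons, Option.getD_some]
        norm_num
      rw [hmin, PySem.List.slice_from _ (by norm_num)]
      have h1 : ((10000 : Int) + 1).toNat = 9999 + 1 + 1 := rfl
      rw [h1, List.drop_succ_cons, List.drop_succ_cons]
      intro heq
      have h2 := congrArg String.toList heq
      simp only [String.toList_ofList] at h2
      have h3 : rest.drop 9999 = [] := List.append_right_eq_self.mp h2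
      have h4 := congrArg List.length h3
      rw [List.length_drop] at h4
      simp at h4
      omega
    · -- an operator exists after index 1
      obtain ⟨pre, suf, hrest, hlen, hpre, hdop⟩ := pvFirstOp_decomp rest k d hfo
      have hm : c :: rest = (c :: pre) ++ (d :: suf) := by simp [hrest]
      obtain ⟨hfi, hlt, hgd⟩ := pvFi_some rest k d hfo
      simp only [hfi, hgd] at hd
      have hdm : d ∈ c :: rest := by simp [hrest]
      have hG : (pvOps.any fun op => PySem.Chars.isIn [op] (c :: rest)) = true :=
        List.any_eq_true.mpr ⟨d, hdop,
          (PySem.Chars.isIn_iff_infix _ _).mpr ((List.singleton_infix_iff d _).mpr hdm)⟩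
      rw [if_pos hG, pvScan_some _ rest k d hfo]
      simp only [pvOps, List.map_cons, List.map_nil, PySem.List.min?_id_cons, Option.getD_some]
      by_cases hdc : d = c
      · -- leading operator repeated: A's find ignores the recurrence
        rw [if_pos (by simp [hdc])] at hd
        have hk9 : k ≠ 9999 := by simpa using hd
        have hA' : ∀ op ∈ pvOps, 1 ≤ (if PySem.Chars.find (c :: rest) [op] > 0 then PySem.Chars.find (c :: rest) [op] else 10000)
            ∧ (if PySem.Chars.find (c :: rest) [op] > 0 then PySem.Chars.find (c :: rest) [op] else 10000) ≠ (k : Int) + 1 := by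
          intro op hop
          by_cases hoc : op = c
          · subst hoc
            have h0 : PySem.Chars.find (op :: rest) [op] = (0 : Int) := by
              simpa using pvFind_first [] rest op (by simp)
            rw [h0]
            norm_num
            omega
          · have hm2 : c :: rest = (c :: pre ++ [d]) ++ suf := by simp [hrest]
            have hpre' : ∀ x ∈ (c :: pre ++ [d]), x ≠ op := by
              intro x hx
              rcases List.mem_cons.mp hx with h1 | h1
              · exact h1 ▸ (fun he => hoc he.symm)
              · rcases List.mem_append.mp h1 with h2 | h2
                · exact fun he => (hpre x h2) (he ▸ hop)
                · have : x = d := by simpa using h2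
                  exact this ▸ (hdc ▸ fun he => hoc he.symm)
            rw [hm2]
            have hplen : ((c :: pre ++ [d]).length : Int) = (k : Int) + 2 := by
              simp [hlen]
              omega
            rcases pvFind_lb (c :: pre ++ [d]) suf op hpre' with hf | hf
            · rw [hf]
              norm_num
              omega
            · rw [hplen] at hf
              rw [if_pos (by omega)]
              omega
        obtain ⟨hM1, hM2⟩ := pvMin4ne _ _ _ _ ((k : Int) + 1)
          (hA' '+' (by decide)) (hA' '*' (by decide)) (hA' '-' (by decide)) (hA' '/' (by decide))
        rw [PySem.List.slice_from _ (by omega)]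
        intro heq
        have h2 := congrArg String.toList heq
        simp only [String.toList_ofList] at h2
        have h3 := List.append_cancel_left h2
        have h4 := congrArg List.length h3
        rw [List.length_drop, List.length_drop] at h4
        simp only [List.length_cons] at h4
        omega
      · -- first operator lies at or beyond the sentinel
        rw [if_neg (by simp [hdc])] at hd
        simp [List.contains_eq_mem] at hd
        obtain ⟨h10, hor⟩ := hd
        have hA1 : ∀ op ∈ pvOps, 1 ≤ (if PySem.Chars.find (c :: rest) [op] > 0 then PySem.Chars.find (c :: rest) [op] else 10000) := by
          intro op hop
          split_ifs with h
          · omega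
          · norm_num
        have hex : ∃ op₀ ∈ pvOps,
            (if PySem.Chars.find (c :: rest) [op₀] > 0 then PySem.Chars.find (c :: rest) [op₀] else 10000) = 10000 := by
          have key : ∀ op₀ ∈ pvOps, (op₀ = c ∨ op₀ ∉ rest) →
              (if PySem.Chars.find (c :: rest) [op₀] > 0 then PySem.Chars.find (c :: rest) [op₀] else 10000) = 10000 := by
            intro op₀ hop₀ hcase
            rcases hcase with h | h
            · subst h
              have h0 : PySem.Chars.find (op₀ :: rest) [op₀] = (0 : Int) := by
                simpa using pvFind_first [] rest op₀ (by simp)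
              rw [h0]; norm_num
            · by_cases hoc : op₀ = c
              · subst hoc
                have h0 : PySem.Chars.find (op₀ :: rest) [op₀] = (0 : Int) := by
                  simpa using pvFind_first [] rest op₀ (by simp)
                rw [h0]; norm_num
              · have hfo2 : PySem.Chars.find (c :: rest) [op₀] = -1 := by
                  apply pvFind_not_mem
                  intro hmem
                  rcases List.mem_cons.mp hmem with h1 | h1
                  · exact hoc h1
                  · exact h h1
                rw [hfo2]; norm_num
          rcases hor with h | h
          · exact ⟨c, h, key c h (Or.inl rfl)⟩
          · have hany : rest.any pvOps.contains = true :=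
              List.any_eq_true.mpr ⟨d, by simp [hrest], by simp [List.contains_eq_mem, hdop]⟩
            rw [hany] at h
            have hall : pvOps.all rest.contains = false := by
              cases hx : pvOps.all rest.contains
              · rfl
              · exact absurd hx.symm h
            have hex' : ∃ op₀ ∈ pvOps, op₀ ∉ rest := by
              have := List.all_eq_false.mp hall
              obtain ⟨op₀, hop₀, hnr⟩ := this
              exact ⟨op₀, hop₀, by simpa [List.contains_eq_mem] using hnr⟩
            obtain ⟨op₀, hop₀, hnr⟩ := hex'
            exact ⟨op₀, hop₀, key op₀ hop₀ (Or.inr hnr)⟩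
        obtain ⟨hM1, hM2⟩ := pvMin4le _ _ _ _
          (hA1 '+' (by decide)) (hA1 '*' (by decide)) (hA1 '-' (by decide)) (hA1 '/' (by decide))
          (by
            obtain ⟨op₀, hop₀, hval⟩ := hex
            have : op₀ = '+' ∨ op₀ = '*' ∨ op₀ = '-' ∨ op₀ = '/' := by simpa [pvOps] using hop₀
            rcases this with rfl | rfl | rfl | rfl
            · exact Or.inl hval
            · exact Or.inr (Or.inl hval)
            · exact Or.inr (Or.inr (Or.inl hval))
            · exact Or.inr (Or.inr (Or.inr hval)))
        rw [PySem.List.slice_from _ (by omega)]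
        intro heq
        have h2 := congrArg String.toList heq
        simp only [String.toList_ofList] at h2
        have h3 := List.append_cancel_left h2
        have h4 := congrArg List.length h3
        rw [List.length_drop, List.length_drop] at h4
        simp only [List.length_cons] at h4
        omega
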